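-- pv_equiv track=rewrite | github.com/braunadelinea/CS175_AiAyAy | bag_of_words.py | calculate_bag_of_words
-- ===== SOURCE A (Python) =====
-- from collections import Counter
--
-- def calculate_bag_of_words(documents, terms):
--     bow_matrix = {}
--     doc_counters = [Counter(doc) for doc in documents]
--
--     for i, term in enumerate(terms):
--         for j, doc_counter in enumerate(doc_counters):
--             count = doc_counter[term]
--             if count > 0:
--                 bow_matrix[(i, j)] = count
--     return bow_matrix
-- ===== SOURCE B (Python) =====
-- from collections import Counter
--
-- def calculate_bag_of_words(documents, terms):
--     # Build an inverted index once: token -> [(doc_index, count), ...] from each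
--     # document's Counter, then emit each term's postings; no terms x documents scan.
--     postings = {}
--     for j, doc in enumerate(documents):
--         for token, c in Counter(doc).items():
--             postings.setdefault(token, []).append((j, c))
--     return {(i, j): c
--             for i, term in enumerate(terms)
--             for (j, c) in postings.get(term, ())}
-- ===== Notes on version B (the rewrite author's own statement) =====
-- stated objective: alternative
-- what changed: Instead of looking up every term in every document's counter (terms x documents lookups), B builds an inverted index token -> [(doc_index, count)] in one pass over the documents' Counters and then just emits each term's postings in row order.
import Mathlib
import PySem

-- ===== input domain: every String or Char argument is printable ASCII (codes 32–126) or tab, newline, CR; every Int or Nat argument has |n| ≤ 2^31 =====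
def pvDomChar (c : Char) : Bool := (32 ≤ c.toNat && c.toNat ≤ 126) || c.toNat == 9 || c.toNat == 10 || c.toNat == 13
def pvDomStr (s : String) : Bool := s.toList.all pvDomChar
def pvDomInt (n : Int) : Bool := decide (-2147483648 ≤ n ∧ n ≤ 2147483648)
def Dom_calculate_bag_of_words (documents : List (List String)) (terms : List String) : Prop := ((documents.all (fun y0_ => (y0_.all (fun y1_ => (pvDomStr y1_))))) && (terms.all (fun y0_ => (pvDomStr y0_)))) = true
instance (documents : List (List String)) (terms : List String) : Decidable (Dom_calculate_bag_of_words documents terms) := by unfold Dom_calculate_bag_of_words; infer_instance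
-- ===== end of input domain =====

-- B replaces A's terms×documents scan by an inverted index (token → (doc, count) postings)
-- built in one pass over the documents' counters; same dict, same insertion order.

-- ===== PORT A =====
def calculate_bag_of_words (documents : List (List String)) (terms : List String) : List (Int × Int × Int) :=
  -- bow_matrix = {}; doc_counters = [Counter(doc) for doc in documents]
  let doc_counters := documents.map (fun doc => PySem.Dict.counter doc)
  -- for i, term in enumerate(terms): for j, doc_counter in enumerate(doc_counters): …
  let bow_matrix : PySem.Dict (Int × Int) Int :=
    (PySem.List.enumerate terms).foldl (fun bow p =>
      (PySem.List.enumerate doc_counters).foldl (fun bow q =>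
        let count := q.2.getD p.2 0
        if count > 0 then bow.insert (p.1, q.1) count else bow) bow)
      PySem.Dict.empty
  -- the returned dict[(i, j)] = count, flattened to triples per the type convention
  bow_matrix.items.map (fun r => (r.1.1, r.1.2, r.2))

-- ===== PORT B =====
def calculate_bag_of_words_alt (documents : List (List String)) (terms : List String) : List (Int × Int × Int) :=
  -- postings = {}; for j, doc: for token, c in Counter(doc).items(): postings.setdefault(token, []).append((j, c))
  let postings : PySem.Dict String (List (Int × Int)) :=
    (PySem.List.enumerate documents).foldl (fun d q =>
      ((PySem.Dict.counter q.2).items).foldl (fun d tc => d.modify tc.1 [] (· ++ [(q.1, tc.2)])) d)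
      PySem.Dict.empty
  -- {(i, j): c for i, term in enumerate(terms) for (j, c) in postings.get(term, ())}
  let out : PySem.Dict (Int × Int) Int :=
    ((PySem.List.enumerate terms).flatMap (fun p =>
        (postings.getD p.2 []).map (fun jc => ((p.1, jc.1), jc.2)))).foldl
      (fun d r => d.insert r.1 r.2) PySem.Dict.empty
  out.items.map (fun r => (r.1.1, r.1.2, r.2))

-- ===== PRECONDITION & SPEC =====
def Spec_calculate_bag_of_words (documents : List (List String)) (terms : List String) (out : List (Int × Int × Int)) : Prop := out = calculate_bag_of_words_alt documents terms
instance (documents : List (List String)) (terms : List String) (out : List (Int × Int × Int)) : Decidable (Spec_calculate_bag_of_words documents terms out) := by unfold Spec_calculate_bag_of_words; infer_instance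

-- ===== CLAIM (what is proved, stated in full; the proofs are below) =====
def Claim_equal_calculate_bag_of_words : Prop := ∀ (documents : List (List String)) (terms : List String), Dom_calculate_bag_of_words documents terms → Spec_calculate_bag_of_words documents terms (calculate_bag_of_words documents terms)

-- ===== LEMMAS AND PROOFS =====

-- the common value, as the list of ((i, j), count) dict items
def pvSpecRow (documents : List (List String)) (i : Int) (t : String) : List ((Int × Int) × Int) :=
  ((PySem.List.enumerate documents).filter (fun q => decide (t ∈ q.2))).map
    (fun q => ((i, q.1), (q.2.count t : Int)))

def pvSpec (documents : List (List String)) (terms : List String) : List ((Int × Int) × Int) :=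
  (PySem.List.enumerate terms).flatMap (fun p => pvSpecRow documents p.1 p.2)

theorem pv_enumerate_map {α β : Type} (f : α → β) (xs : List α) (s : Int) :
    PySem.List.enumerate (xs.map f) s = (PySem.List.enumerate xs s).map (fun p => (p.1, f p.2)) := by
  induction xs generalizing s with
  | nil => rfl
  | cons x xs ih => simp [PySem.List.enumerate_cons, ih]

theorem pv_innerA (dcs : List (PySem.Dict String Int)) (i : Int) (t : String)
    (bow : PySem.Dict (Int × Int) Int) (h : ∀ k ∈ bow.keys, k.1 ≠ i) :
    ((PySem.List.enumerate dcs).foldl (fun bow q =>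
        let count := q.2.getD t 0
        if count > 0 then bow.insert (i, q.1) count else bow) bow).items
      = bow.items ++ ((PySem.List.enumerate dcs).filter (fun q => decide (0 < q.2.getD t 0))).map
          (fun q => ((i, q.1), q.2.getD t 0)) := by
  have step : (fun (bow : PySem.Dict (Int × Int) Int) (q : Int × PySem.Dict String Int) =>
        let count := q.2.getD t 0
        if count > 0 then bow.insert (i, q.1) count else bow)
      = fun bow q => if 0 < q.2.getD t 0 then bow.insert (i, q.1) (q.2.getD t 0) else bow := rfl
  have e := PySem.List.foldl_ite_eq_foldl_filter
      (p := fun q : Int × PySem.Dict String Int => 0 < q.2.getD t 0)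
      (f := fun (bow : PySem.Dict (Int × Int) Int) q => bow.insert (i, q.1) (q.2.getD t 0))
      (PySem.List.enumerate dcs) bow
  rw [step, e]
  apply PySem.Dict.items_foldl_insert_fresh
  · intro q hq
    cases hb : bow.contains (i, q.1) with
    | false => rfl
    | true =>
      exfalso
      exact h _ ((PySem.Dict.contains_iff_mem_keys bow _).1 hb) rfl
  · have hp := PySem.List.pairwise_lt_enumerate dcs 0
    have hf := hp.filter (fun q => decide (0 < q.2.getD t 0))
    have hne : List.Pairwise (fun a b : Int × PySem.Dict String Int =>
        ((i, a.1) : Int × Int) ≠ (i, b.1))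
        ((PySem.List.enumerate dcs).filter (fun q => decide (0 < q.2.getD t 0))) := by
      refine hf.imp ?_
      intro a b hab he
      have : a.1 = b.1 := by
        have := congrArg Prod.snd he
        simpa using this
      omega
    exact (List.pairwise_map).2 hne

theorem pv_outerA (dcs : List (PySem.Dict String Int)) (ts : List String) (s : Int)
    (bow : PySem.Dict (Int × Int) Int) (h : ∀ k ∈ bow.keys, k.1 < s) :
    ((PySem.List.enumerate ts s).foldl (fun bow p =>
        (PySem.List.enumerate dcs).foldl (fun bow q =>
          let count := q.2.getD p.2 0
          if count > 0 then bow.insert (p.1, q.1) count else bow) bow) bow).items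
      = bow.items ++ (PySem.List.enumerate ts s).flatMap (fun p =>
          ((PySem.List.enumerate dcs).filter (fun q => decide (0 < q.2.getD p.2 0))).map
            (fun q => ((p.1, q.1), q.2.getD p.2 0))) := by
  induction ts generalizing s bow with
  | nil => simp [PySem.List.enumerate]
  | cons t ts ih =>
    rw [PySem.List.enumerate_cons, List.foldl_cons, List.flatMap_cons]
    have hne : ∀ k ∈ bow.keys, k.1 ≠ s := fun k hk => by have := h k hk; omega
    have hitems := pv_innerA dcs s t bow hne
    have hkeys' : ∀ k ∈ ((PySem.List.enumerate dcs).foldl (fun bow q =>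
        let count := q.2.getD t 0
        if count > 0 then bow.insert (s, q.1) count else bow) bow).keys, k.1 < s + 1 := by
      intro k hk
      simp only [PySem.Dict.keys, hitems, List.map_append, List.mem_append, List.map_map] at hk
      rcases hk with hk | hk
      · have := h k hk; omega
      · rcases List.mem_map.1 hk with ⟨q, _, rfl⟩
        simp
    rw [ih (s + 1) _ hkeys', hitems, List.append_assoc]

theorem pv_lemA (documents : List (List String)) (terms : List String) :
    calculate_bag_of_words documents terms
      = (pvSpec documents terms).map (fun r => (r.1.1, r.1.2, r.2)) := by
  have hdef : calculate_bag_of_words documents terms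
      = ((PySem.List.enumerate terms).foldl (fun bow p =>
          (PySem.List.enumerate (documents.map (fun doc => PySem.Dict.counter doc))).foldl
            (fun bow q =>
              let count := q.2.getD p.2 0
              if count > 0 then bow.insert (p.1, q.1) count else bow) bow)
          PySem.Dict.empty).items.map (fun r => (r.1.1, r.1.2, r.2)) := rfl
  rw [hdef, pv_outerA _ terms 0 PySem.Dict.empty (by intro k hk; simp [PySem.Dict.keys_empty] at hk)]
  have hempty : (PySem.Dict.empty : PySem.Dict (Int × Int) Int).items = [] := rfl
  rw [hempty, List.nil_append]
  congr 1
  apply List.flatMap_congr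
  intro p _
  rw [pv_enumerate_map, List.filter_map, List.map_map]
  unfold pvSpecRow
  rw [List.filter_congr (q := fun q => decide (p.2 ∈ q.2))
      (by intro r _; simp [Function.comp, PySem.Dict.getD_counter, List.count_pos_iff])]
  apply List.map_congr_left
  intro r _
  simp [Function.comp, PySem.Dict.getD_counter]

-- ===== B-side =====
theorem pv_postings_doc (j : Int) (L : List (String × Int)) (d : PySem.Dict String (List (Int × Int)))
    (t : String) :
    (L.foldl (fun d tc => d.modify tc.1 [] (· ++ [(j, tc.2)])) d).getD t []
      = d.getD t [] ++ (L.filter (fun tc => tc.1 == t)).map (fun tc => (j, tc.2)) := by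
  induction L generalizing d with
  | nil => simp
  | cons x xs ih =>
    simp only [List.foldl_cons, List.filter_cons, ih]
    by_cases h : x.1 = t
    · simp [h]
    · have h2 : ¬ (t = x.1) := fun h' => h h'.symm
      simp [PySem.Dict.getD_modify, h, h2]

theorem pv_nodup_filter_eq {α : Type} [BEq α] [LawfulBEq α] (l : List α) (hl : l.Nodup) (t : α) :
    l.filter (fun x => x == t) = if t ∈ l then [t] else [] := by
  induction l with
  | nil => simp
  | cons a l ih =>
    rcases List.nodup_cons.1 hl with ⟨ha, hl'⟩
    by_cases h : a = t
    · subst h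
      have hrest : l.filter (fun x => x == a) = [] := by
        apply List.filter_eq_nil_iff.2
        intro x hx
        simp
        intro h'
        exact ha (h' ▸ hx)
      simp [hrest]
    · simp only [List.filter_cons, List.mem_cons]
      have hne : (a == t) = false := by simp [h]
      have h2 : ¬ (t = a) := fun h' => h h'.symm
      simp [hne, ih hl', h2]

theorem pv_counter_postings (j : Int) (doc : List String) (t : String) :
    (((PySem.Dict.counter doc).items).filter (fun tc => tc.1 == t)).map (fun tc => (j, tc.2))
      = if t ∈ doc then [(j, (doc.count t : Int))] else [] := by
  rw [PySem.Dict.items_counter, List.filter_map]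
  have hcomp : ((fun tc : String × Int => tc.1 == t) ∘ fun k => (k, (doc.count k : Int)))
      = fun k => k == t := rfl
  rw [hcomp, pv_nodup_filter_eq (PySem.Set.ofList doc) (PySem.Set.nodup_ofList doc) t]
  by_cases h : t ∈ doc
  · simp [h, (PySem.Set.mem_ofList doc t).2 h]
  · have h2 : t ∉ PySem.Set.ofList doc := fun hc => h ((PySem.Set.mem_ofList doc t).1 hc)
    simp [h, h2]

theorem pv_postingsB (ds : List (List String)) (s : Int)
    (d : PySem.Dict String (List (Int × Int))) (t : String) :
    ((PySem.List.enumerate ds s).foldl (fun d q =>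
        ((PySem.Dict.counter q.2).items).foldl (fun d tc => d.modify tc.1 [] (· ++ [(q.1, tc.2)])) d) d).getD t []
      = d.getD t [] ++ (PySem.List.enumerate ds s).flatMap (fun q =>
          if t ∈ q.2 then [(q.1, (q.2.count t : Int))] else []) := by
  induction ds generalizing s d with
  | nil => simp [PySem.List.enumerate]
  | cons doc ds ih =>
    rw [PySem.List.enumerate_cons, List.foldl_cons, List.flatMap_cons]
    rw [ih (s + 1), pv_postings_doc s ((PySem.Dict.counter doc).items) d t,
        pv_counter_postings s doc t, List.append_assoc]

theorem pv_spec_keys_nodup (documents : List (List String)) (terms : List String) :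
    ((pvSpec documents terms).map Prod.fst).Nodup := by
  unfold pvSpec
  rw [List.map_flatMap]
  show List.Pairwise (· ≠ ·) _
  apply List.pairwise_flatMap.2
  constructor
  · intro p _
    unfold pvSpecRow
    rw [List.map_map]
    have hf := (PySem.List.pairwise_lt_enumerate documents 0).filter
        (fun q => decide (p.2 ∈ q.2))
    have hne : List.Pairwise (fun a b : Int × List String =>
        (Prod.fst ∘ fun q : Int × List String => ((p.1, q.1), (q.2.count p.2 : Int))) a
          ≠ (Prod.fst ∘ fun q => ((p.1, q.1), (q.2.count p.2 : Int))) b)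
        ((PySem.List.enumerate documents).filter (fun q => decide (p.2 ∈ q.2))) := by
      refine hf.imp ?_
      intro a b hab he
      have : a.1 = b.1 := by
        have := congrArg Prod.snd he
        simpa using this
      omega
    exact (List.pairwise_map).2 hne
  · have hp := PySem.List.pairwise_lt_enumerate terms 0
    refine hp.imp ?_
    intro a b hab x hx y hy
    unfold pvSpecRow at hx hy
    rw [List.map_map] at hx hy
    rcases List.mem_map.1 hx with ⟨qa, _, rfl⟩
    rcases List.mem_map.1 hy with ⟨qb, _, rfl⟩
    intro he
    have : a.1 = b.1 := by
      have := congrArg Prod.fst he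
      simpa using this
    omega

theorem pv_filter_map_eq_flatMap {α β : Type} (p : α → Bool) (f : α → β) (l : List α) :
    (l.filter p).map f = l.flatMap (fun x => if p x then [f x] else []) := by
  induction l with
  | nil => rfl
  | cons x xs ih =>
    by_cases h : p x
    · simp [h, ih]
    · simp [h, ih]

theorem pv_lemB (documents : List (List String)) (terms : List String) :
    calculate_bag_of_words_alt documents terms
      = (pvSpec documents terms).map (fun r => (r.1.1, r.1.2, r.2)) := by
  simp only [calculate_bag_of_words_alt]
  have hL : ((PySem.List.enumerate terms).flatMap (fun p =>
        ((((PySem.List.enumerate documents).foldl (fun d q =>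
            ((PySem.Dict.counter q.2).items).foldl
              (fun d tc => d.modify tc.1 [] (· ++ [(q.1, tc.2)])) d)
          PySem.Dict.empty)).getD p.2 []).map (fun jc => ((p.1, jc.1), jc.2))))
      = pvSpec documents terms := by
    unfold pvSpec
    apply List.flatMap_congr
    intro p _
    rw [pv_postingsB documents 0 PySem.Dict.empty p.2,
        PySem.Dict.getD_empty, List.nil_append, List.map_flatMap]
    unfold pvSpecRow
    rw [pv_filter_map_eq_flatMap]
    apply List.flatMap_congr
    intro q _
    by_cases h : p.2 ∈ q.2
    · simp [h]
    · simp [h]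
  have hnodup : (((PySem.List.enumerate terms).flatMap (fun p =>
        ((((PySem.List.enumerate documents).foldl (fun d q =>
            ((PySem.Dict.counter q.2).items).foldl
              (fun d tc => d.modify tc.1 [] (· ++ [(q.1, tc.2)])) d)
          PySem.Dict.empty)).getD p.2 []).map (fun jc => ((p.1, jc.1), jc.2)))).map Prod.fst).Nodup := by
    rw [hL]
    exact pv_spec_keys_nodup documents terms
  rw [PySem.Dict.items_foldl_insert_fresh _ Prod.fst Prod.snd PySem.Dict.empty
      (fun a _ => PySem.Dict.contains_empty _) hnodup]
  rw [show (PySem.Dict.empty : PySem.Dict (Int × Int) Int).items = [] from rfl, List.nil_append]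
  rw [show (fun a : (Int × Int) × Int => (Prod.fst a, Prod.snd a)) = id by funext a; rfl, List.map_id]
  rw [hL]

-- ===== VERDICT (by name: the statement is the Claim_ definition above) =====
theorem calculate_bag_of_words_spec : Claim_equal_calculate_bag_of_words := by
  intro documents terms _
  unfold Spec_calculate_bag_of_words
  rw [pv_lemA, pv_lemB]
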